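-- pv_equiv track=rewrite | github.com/BiznetGIO/RESTKnot | api/app/libs/validation.py | count_character
-- ===== SOURCE A (Python) =====
-- def count_character(name):
--     if name.find("."):
--         spl_name = name.split(".")
--         total = 0
--         for i in spl_name:
--             if len(i) >= 64:
--                 return True
--             else:
--                 total = total + len(i)
--         if total >= 255:
--             return True
--         else:
--             return False
--     else:
--         return False
-- ===== SOURCE B (Python) =====
-- def count_character(name):
--     if name.find("."):
--         total = 0
--         cur = 0
--         for ch in name:
--             if ch == ".":
--                 if cur >= 64:
--                     return True
--                 total += cur
--                 cur = 0
--             else: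
--                 cur += 1
--         if cur >= 64:
--             return True
--         total += cur
--         return total >= 255
--     else:
--         return False
-- ===== Notes on version B (the rewrite author's own statement) =====
-- stated objective: alternative
-- what changed: B keeps A's outer find-based guard but replaces the split-into-labels list construction and the loop over that list by a single character-by-character scan maintaining a running current-label length and a running total, never materialising the label list.
import Mathlib
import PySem

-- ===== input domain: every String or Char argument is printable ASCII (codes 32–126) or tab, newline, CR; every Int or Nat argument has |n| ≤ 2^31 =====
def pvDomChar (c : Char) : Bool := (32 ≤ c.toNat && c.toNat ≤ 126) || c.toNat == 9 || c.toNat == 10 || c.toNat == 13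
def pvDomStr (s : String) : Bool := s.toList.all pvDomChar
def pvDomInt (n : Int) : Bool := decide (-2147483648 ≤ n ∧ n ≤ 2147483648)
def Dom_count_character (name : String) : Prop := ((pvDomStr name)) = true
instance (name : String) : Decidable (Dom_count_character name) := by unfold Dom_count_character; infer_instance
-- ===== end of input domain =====

-- B replaces A's split(".")-then-loop-over-labels by a one-pass character scan with running counters; same guard, same value everywhere.

-- ===== PORT A =====
-- A's for-loop over the split pieces, with early return True on a long label
def countLoopA : List (List Char) → Int → Bool
  | [], total => decide ((255 : Int) ≤ total)
  | i :: rest, total =>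
      if (64 : Int) ≤ (i.length : Int) then true
      else countLoopA rest (total + (i.length : Int))

def count_character (name : String) : Bool :=
  if PySem.Str.find name "." ≠ 0 then
    countLoopA (PySem.Chars.splitOn name.toList ['.']) 0
  else false

-- ===== PORT B =====
-- B's single pass: total = sum of finished label lengths, cur = current label length
def countLoopB : List Char → Int → Int → Bool
  | [], total, cur =>
      if (64 : Int) ≤ cur then true else decide ((255 : Int) ≤ total + cur)
  | c :: rest, total, cur =>
      if c = '.' then
        if (64 : Int) ≤ cur then true else countLoopB rest (total + cur) 0
      else countLoopB rest total (cur + 1)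

def count_character_alt (name : String) : Bool :=
  if PySem.Str.find name "." ≠ 0 then
    countLoopB name.toList 0 0
  else false

-- ===== PRECONDITION & SPEC =====
def Spec_count_character (name : String) (out : Bool) : Prop := out = count_character_alt name
instance (name : String) (out : Bool) : Decidable (Spec_count_character name out) := by unfold Spec_count_character; infer_instance

-- ===== CLAIM (what is proved, stated in full; the proofs are below) =====
def Claim_equal_count_character : Prop := ∀ (name : String), Dom_count_character name → Spec_count_character name (count_character name)

-- ===== LEMMAS AND PROOFS =====

-- structural recurrence for splitting on a single '.'; cur is the reversed current chunk
def dotSplit : List Char → List Char → List (List Char)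
  | [], cur => [cur.reverse]
  | c :: rest, cur => if c = '.' then cur.reverse :: dotSplit rest [] else dotSplit rest (c :: cur)

theorem splitOn_go_dot (fuel : Nat) :
    ∀ (l cur : List Char) (acc : List (List Char)), l.length ≤ fuel →
      PySem.Chars.splitOn.go ['.'] fuel l cur acc =
        acc.reverse ++ dotSplit l cur := by
  induction fuel with
  | zero =>
      intro l cur acc h
      have : l = [] := List.eq_nil_of_length_eq_zero (Nat.le_zero.mp h)
      subst this
      simp [PySem.Chars.splitOn.go, dotSplit]
  | succ n ih =>
      intro l cur acc h
      cases l with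
      | nil => simp [PySem.Chars.splitOn.go, dotSplit]
      | cons c rest =>
          simp only [PySem.Chars.splitOn.go]
          by_cases hc : c = '.'
          · subst hc
            rw [if_pos (by simp [List.isPrefixOf])]
            simp only [List.length_cons, List.drop_succ_cons, List.length_nil, List.drop_zero]
            rw [ih rest [] (cur.reverse :: acc) (by simpa using h)]
            simp [dotSplit]
          · rw [if_neg (by simp [List.isPrefixOf]; exact fun h' => hc h'.symm)]
            rw [ih rest (c :: cur) acc (by simpa using h)]
            simp [dotSplit, hc]

theorem splitOn_dot (l : List Char) :
    PySem.Chars.splitOn l ['.'] = dotSplit l [] := by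
  unfold PySem.Chars.splitOn
  rw [splitOn_go_dot (l.length + 1) l [] [] (by omega)]
  simp

theorem loopB_eq_loopA :
    ∀ (l : List Char) (cur : List Char) (total : Int),
      countLoopB l total (cur.length : Int) = countLoopA (dotSplit l cur) total := by
  intro l
  induction l with
  | nil =>
      intro cur total
      simp [countLoopB, countLoopA, dotSplit]
  | cons c rest ih =>
      intro cur total
      by_cases hc : c = '.'
      · subst hc
        by_cases h64 : (64 : Int) ≤ (cur.length : Int)
        · simp [countLoopB, dotSplit, countLoopA, h64]
        · simpa [countLoopB, dotSplit, countLoopA, h64] using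
            ih [] (total + (cur.length : Int))
      · simp only [countLoopB, dotSplit, if_neg hc]
        have := ih (c :: cur) total
        simpa [List.length_cons, Int.natCast_add] using this

-- ===== VERDICT (by name: the statement is the Claim_ definition above) =====
theorem count_character_spec : Claim_equal_count_character := by
  intro name _
  unfold Spec_count_character count_character count_character_alt
  by_cases hg : PySem.Str.find name "." ≠ 0
  · rw [if_pos hg, if_pos hg, splitOn_dot]
    simpa using (loopB_eq_loopA name.toList [] 0).symm
  · rw [if_neg hg, if_neg hg]
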